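-- pv_equiv track=rewrite | github.com/mooyah5/Programmers | Python/연습/Level 0/옹알이.py | solution
-- ===== SOURCE A (Python) =====
-- def solution(babbling):
--     bab_list = ['aya', 'ye', 'woo', 'ma']
--     answer = 0
--     for bab in babbling:                    # 단어 하나씩 추출
--         word = ''
--         cnt = 0
--         for b in bab:                       # 단어의 글자씩 추출하여 word 이어붙이다가
--             word += b
--             if word in bab_list:            # 이어붙인 word가 발음 가능하면 cnt증가 후 word 초기화
--                 word = ''
--                 cnt += 1
--         if len(word) == 0 and cnt > 0:      # 단어 하나 회문 돌고나서 남은 쓰레기 단어가 없고, cnt가 존재하면 answer 증가!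
--             answer += 1
--     return answer
-- ===== SOURCE B (Python) =====
-- def solution(babbling):
--     tokens = ('aya', 'ye', 'woo', 'ma')
--
--     def ok(w):
--         return any(w == t or (w.startswith(t) and ok(w[len(t):])) for t in tokens)
--
--     return sum(ok(bab) for bab in babbling)
-- ===== Notes on version B (the rewrite author's own statement) =====
-- stated objective: alternative
-- what changed: A's per-word greedy scanner that accumulates characters and resets on a token match is replaced by a recursive recognizer that strips a matching token prefix off the word (tokens are prefix-free, so the two recognizers agree); the count is a sum over words.
import Mathlib
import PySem

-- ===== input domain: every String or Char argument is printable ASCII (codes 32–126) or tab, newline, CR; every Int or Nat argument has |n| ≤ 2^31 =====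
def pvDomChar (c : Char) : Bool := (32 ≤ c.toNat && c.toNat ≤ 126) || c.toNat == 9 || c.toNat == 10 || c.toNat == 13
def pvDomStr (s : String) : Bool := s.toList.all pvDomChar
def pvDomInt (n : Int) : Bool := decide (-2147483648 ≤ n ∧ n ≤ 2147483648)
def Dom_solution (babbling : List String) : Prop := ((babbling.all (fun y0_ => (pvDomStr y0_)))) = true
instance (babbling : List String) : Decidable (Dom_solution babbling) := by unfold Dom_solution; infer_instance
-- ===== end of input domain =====

-- B replaces A's character-accumulating greedy scanner by a recursive prefix-stripping
-- recognizer per word (an alternative decomposition of the same cost).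

-- ===== PORT A =====
-- the fixed sound list ['aya', 'ye', 'woo', 'ma'] (as lists of chars)
def pvBabList : List (List Char) := [['a','y','a'], ['y','e'], ['w','o','o'], ['m','a']]

-- one step of A's inner loop: word += b; if word in bab_list: word = ''; cnt += 1
def pvStepA (wc : List Char × Int) (b : Char) : List Char × Int :=
  let word := wc.1 ++ [b]
  if word ∈ pvBabList then ([], wc.2 + 1) else (word, wc.2)

def solution (babbling : List String) : Int :=
  babbling.foldl (fun answer bab =>
    let wc := bab.toList.foldl pvStepA ([], (0 : Int))
    if wc.1.length = 0 ∧ wc.2 > 0 then answer + 1 else answer) 0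

-- ===== PORT B =====
-- B's ok(w): any(w == t or (w.startswith(t) and ok(w[len(t):])) for t in tokens)
def pvOkB (w : List Char) : Bool :=
  ((w == ['a','y','a']) || (if ['a','y','a'].isPrefixOf w then pvOkB (w.drop 3) else false)) ||
  ((w == ['y','e'])     || (if ['y','e'].isPrefixOf w     then pvOkB (w.drop 2) else false)) ||
  ((w == ['w','o','o']) || (if ['w','o','o'].isPrefixOf w then pvOkB (w.drop 3) else false)) ||
  ((w == ['m','a'])     || (if ['m','a'].isPrefixOf w     then pvOkB (w.drop 2) else false))
termination_by w.length
decreasing_by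
  all_goals
    rename_i h
    have hp := (List.isPrefixOf_iff_prefix).mp h
    have hl := hp.length_le
    simp at hl ⊢
    omega

-- B: sum(ok(bab) for bab in babbling)
def solution_alt (babbling : List String) : Int :=
  babbling.foldl (fun acc bab => acc + (if pvOkB bab.toList then 1 else 0)) 0

-- ===== PRECONDITION & SPEC =====
def Spec_solution (babbling : List String) (out : Int) : Prop := out = solution_alt babbling
instance (babbling : List String) (out : Int) : Decidable (Spec_solution babbling out) := by unfold Spec_solution; infer_instance

-- ===== CLAIM (what is proved, stated in full; the proofs are below) =====
def Claim_equal_solution : Prop := ∀ (babbling : List String), Dom_solution babbling → Spec_solution babbling (solution babbling)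

-- ===== LEMMAS AND PROOFS =====

-- "w is not a proper prefix of any token": from such a word A's scanner never resets again
def pvNoPP (w : List Char) : Prop := ∀ t ∈ pvBabList, ¬ (w <+: t ∧ w ≠ t)
theorem pvNoPP_len3 (w : List Char) (h : w.length = 3) : pvNoPP w := by
  intro t ht ⟨hp, hne⟩
  have hl := hp.length_le
  fin_cases ht <;> simp_all
  · exact hne (hp.eq_of_length (by simp [h]))
  · exact hne (hp.eq_of_length (by simp [h]))
theorem pvNoPP_two (b c : Char) (h1 : b = 'a' → c ≠ 'y') (h2 : b = 'w' → c ≠ 'o') :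
    pvNoPP [b, c] := by
  intro t ht ⟨hp, hne⟩
  fin_cases ht <;> simp [List.cons_prefix_cons] at hp hne <;> tauto
theorem pvNoPP_one (b : Char) (h1 : b ≠ 'a') (h2 : b ≠ 'y') (h3 : b ≠ 'w') (h4 : b ≠ 'm') :
    pvNoPP [b] := by
  intro t ht ⟨hp, hne⟩
  fin_cases ht <;> simp [List.cons_prefix_cons] at hp hne <;> tauto
theorem pvScan_noreset (bab : List Char) : ∀ (w : List Char) (c : Int), pvNoPP w →
    bab.foldl pvStepA (w, c) = (w ++ bab, c) := by
  induction bab with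
  | nil => intro w c _; simp
  | cons b r ih =>
      intro w c h
      have hm : (w ++ [b]) ∉ pvBabList := fun hm =>
        h _ hm ⟨⟨[b], rfl⟩, by intro he; simpa using congrArg List.length he⟩
      have hx : pvNoPP (w ++ [b]) := by
        intro t ht ⟨⟨u, hu⟩, hne⟩
        exact h t ht ⟨⟨[b] ++ u, by simpa using hu⟩,
          by intro he; subst he; simpa using congrArg List.length hu⟩
      simp only [List.foldl_cons, pvStepA, if_neg hm]
      rw [ih _ _ hx]; simp

theorem pvMain : ∀ (n : Nat) (bab : List Char), bab.length ≤ n → ∀ (c : Int),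
    (pvOkB bab = true → ∃ c', bab.foldl pvStepA ([], c) = ([], c') ∧ c < c') ∧
    (pvOkB bab = false → bab ≠ [] → (bab.foldl pvStepA ([], c)).1 ≠ []) := by
  intro n
  induction n with
  | zero =>
      intro bab hlen c
      have : bab = [] := by cases bab <;> simp_all
      subst this
      constructor
      · intro h; rw [pvOkB] at h; simp at h
      · intro _ h; simp at h
  | succ n ih =>
      intro bab hlen c
      rcases bab with _ | ⟨b1, r1⟩
      · constructor
        · intro h; rw [pvOkB] at h; simp at h
        · intro _ h; simp at h
      by_cases hb1a : b1 = 'a'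
      · subst hb1a
        rcases r1 with _ | ⟨b2, r2⟩
        · -- "a"
          have hok : pvOkB ['a'] = false := by rw [pvOkB]; decide
          refine ⟨by simp [hok], fun _ _ => ?_⟩
          simp [pvStepA, pvBabList]
        by_cases hb2 : b2 = 'y'
        · subst hb2
          rcases r2 with _ | ⟨b3, r3⟩
          · -- "ay"
            have hok : pvOkB ['a','y'] = false := by rw [pvOkB]; decide
            refine ⟨by simp [hok], fun _ _ => ?_⟩
            simp [pvStepA, pvBabList]
          by_cases hb3 : b3 = 'a'
          · subst hb3
            -- "aya" ++ r3 : reset after three chars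
            have hfold : ∀ c : Int, ('a'::'y'::'a'::r3).foldl pvStepA ([], c)
                = r3.foldl pvStepA ([], c + 1) := by
              intro c; simp [pvStepA, pvBabList]
            have hok : pvOkB ('a'::'y'::'a'::r3) = (r3.isEmpty || pvOkB r3) := by
              rw [pvOkB]
              rcases r3 with _ | ⟨x, xs⟩ <;> simp [List.isPrefixOf]
            rcases r3 with _ | ⟨x, xs⟩
            · refine ⟨fun _ => ⟨c + 1, by simpa using hfold c, by omega⟩, ?_⟩
              intro hf; rw [hok] at hf; simp at hf
            · have hr := ih (x::xs) (by simp at hlen ⊢; omega) (c + 1)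
              simp at hok
              constructor
              · intro h; rw [hok] at h
                obtain ⟨c', h1, h2⟩ := hr.1 h
                exact ⟨c', by rw [hfold]; exact h1, by omega⟩
              · intro h _
                rw [hok] at h
                rw [hfold]
                exact hr.2 h (by simp)
          · -- "ay" ++ c ≠ 'a' : stuck with word of length 3
            have hok : pvOkB ('a'::'y'::b3::r3) = false := by
              rw [pvOkB]; simp [List.isPrefixOf, hb3, Ne.symm hb3]
            refine ⟨by simp [hok], fun _ _ => ?_⟩
            have h3 : ('a'::'y'::b3::r3).foldl pvStepA ([], c)
                = (['a','y',b3] ++ r3, c) := by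
              have : r3.foldl pvStepA (['a','y',b3], c) = (['a','y',b3] ++ r3, c) :=
                pvScan_noreset r3 _ c (pvNoPP_len3 _ (by simp))
              simpa [pvStepA, pvBabList, hb3] using this
            simp [h3]
        · -- 'a' :: b2 ≠ 'y' : stuck with word of length 2
          have hok : pvOkB ('a'::b2::r2) = false := by
            rw [pvOkB]; simp [List.isPrefixOf, hb2, Ne.symm hb2]
          refine ⟨by simp [hok], fun _ _ => ?_⟩
          have h3 : ('a'::b2::r2).foldl pvStepA ([], c) = (['a',b2] ++ r2, c) := by
            have : r2.foldl pvStepA (['a',b2], c) = (['a',b2] ++ r2, c) :=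
              pvScan_noreset r2 _ c (pvNoPP_two _ _ (fun _ => hb2) (by simp))
            simpa [pvStepA, pvBabList, hb2] using this
          simp [h3]
      by_cases hb1y : b1 = 'y'
      · subst hb1y
        rcases r1 with _ | ⟨b2, r2⟩
        · have hok : pvOkB ['y'] = false := by rw [pvOkB]; decide
          refine ⟨by simp [hok], fun _ _ => ?_⟩
          simp [pvStepA, pvBabList]
        by_cases hb2 : b2 = 'e'
        · subst hb2
          have hfold : ∀ c : Int, ('y'::'e'::r2).foldl pvStepA ([], c)
              = r2.foldl pvStepA ([], c + 1) := by
            intro c; simp [pvStepA, pvBabList]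
          have hok : pvOkB ('y'::'e'::r2) = (r2.isEmpty || pvOkB r2) := by
            rw [pvOkB]
            rcases r2 with _ | ⟨x, xs⟩ <;> simp [List.isPrefixOf]
          rcases r2 with _ | ⟨x, xs⟩
          · refine ⟨fun _ => ⟨c + 1, by simpa using hfold c, by omega⟩, ?_⟩
            intro hf; rw [hok] at hf; simp at hf
          · have hr := ih (x::xs) (by simp at hlen ⊢; omega) (c + 1)
            simp at hok
            constructor
            · intro h; rw [hok] at h
              obtain ⟨c', h1, h2⟩ := hr.1 h
              exact ⟨c', by rw [hfold]; exact h1, by omega⟩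
            · intro h _
              rw [hok] at h
              rw [hfold]
              exact hr.2 h (by simp)
        · have hok : pvOkB ('y'::b2::r2) = false := by
            rw [pvOkB]; simp [List.isPrefixOf, hb2, Ne.symm hb2]
          refine ⟨by simp [hok], fun _ _ => ?_⟩
          have h3 : ('y'::b2::r2).foldl pvStepA ([], c) = (['y',b2] ++ r2, c) := by
            have : r2.foldl pvStepA (['y',b2], c) = (['y',b2] ++ r2, c) :=
              pvScan_noreset r2 _ c (pvNoPP_two _ _ (by simp) (by simp))
            simpa [pvStepA, pvBabList, hb2] using this
          simp [h3]
      by_cases hb1w : b1 = 'w'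
      · subst hb1w
        rcases r1 with _ | ⟨b2, r2⟩
        · have hok : pvOkB ['w'] = false := by rw [pvOkB]; decide
          refine ⟨by simp [hok], fun _ _ => ?_⟩
          simp [pvStepA, pvBabList]
        by_cases hb2 : b2 = 'o'
        · subst hb2
          rcases r2 with _ | ⟨b3, r3⟩
          · have hok : pvOkB ['w','o'] = false := by rw [pvOkB]; decide
            refine ⟨by simp [hok], fun _ _ => ?_⟩
            simp [pvStepA, pvBabList]
          by_cases hb3 : b3 = 'o'
          · subst hb3
            have hfold : ∀ c : Int, ('w'::'o'::'o'::r3).foldl pvStepA ([], c)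
                = r3.foldl pvStepA ([], c + 1) := by
              intro c; simp [pvStepA, pvBabList]
            have hok : pvOkB ('w'::'o'::'o'::r3) = (r3.isEmpty || pvOkB r3) := by
              rw [pvOkB]
              rcases r3 with _ | ⟨x, xs⟩ <;> simp [List.isPrefixOf]
            rcases r3 with _ | ⟨x, xs⟩
            · refine ⟨fun _ => ⟨c + 1, by simpa using hfold c, by omega⟩, ?_⟩
              intro hf; rw [hok] at hf; simp at hf
            · have hr := ih (x::xs) (by simp at hlen ⊢; omega) (c + 1)
              simp at hok
              constructor
              · intro h; rw [hok] at h
                obtain ⟨c', h1, h2⟩ := hr.1 h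
                exact ⟨c', by rw [hfold]; exact h1, by omega⟩
              · intro h _
                rw [hok] at h
                rw [hfold]
                exact hr.2 h (by simp)
          · have hok : pvOkB ('w'::'o'::b3::r3) = false := by
              rw [pvOkB]; simp [List.isPrefixOf, hb3, Ne.symm hb3]
            refine ⟨by simp [hok], fun _ _ => ?_⟩
            have h3 : ('w'::'o'::b3::r3).foldl pvStepA ([], c)
                = (['w','o',b3] ++ r3, c) := by
              have : r3.foldl pvStepA (['w','o',b3], c) = (['w','o',b3] ++ r3, c) :=
                pvScan_noreset r3 _ c (pvNoPP_len3 _ (by simp))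
              simpa [pvStepA, pvBabList, hb3] using this
            simp [h3]
        · have hok : pvOkB ('w'::b2::r2) = false := by
            rw [pvOkB]; simp [List.isPrefixOf, hb2, Ne.symm hb2]
          refine ⟨by simp [hok], fun _ _ => ?_⟩
          have h3 : ('w'::b2::r2).foldl pvStepA ([], c) = (['w',b2] ++ r2, c) := by
            have : r2.foldl pvStepA (['w',b2], c) = (['w',b2] ++ r2, c) :=
              pvScan_noreset r2 _ c (pvNoPP_two _ _ (by simp) (fun _ => hb2))
            simpa [pvStepA, pvBabList, hb2] using this
          simp [h3]
      by_cases hb1m : b1 = 'm'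
      · subst hb1m
        rcases r1 with _ | ⟨b2, r2⟩
        · have hok : pvOkB ['m'] = false := by rw [pvOkB]; decide
          refine ⟨by simp [hok], fun _ _ => ?_⟩
          simp [pvStepA, pvBabList]
        by_cases hb2 : b2 = 'a'
        · subst hb2
          have hfold : ∀ c : Int, ('m'::'a'::r2).foldl pvStepA ([], c)
              = r2.foldl pvStepA ([], c + 1) := by
            intro c; simp [pvStepA, pvBabList]
          have hok : pvOkB ('m'::'a'::r2) = (r2.isEmpty || pvOkB r2) := by
            rw [pvOkB]
            rcases r2 with _ | ⟨x, xs⟩ <;> simp [List.isPrefixOf]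
          rcases r2 with _ | ⟨x, xs⟩
          · refine ⟨fun _ => ⟨c + 1, by simpa using hfold c, by omega⟩, ?_⟩
            intro hf; rw [hok] at hf; simp at hf
          · have hr := ih (x::xs) (by simp at hlen ⊢; omega) (c + 1)
            simp at hok
            constructor
            · intro h; rw [hok] at h
              obtain ⟨c', h1, h2⟩ := hr.1 h
              exact ⟨c', by rw [hfold]; exact h1, by omega⟩
            · intro h _
              rw [hok] at h
              rw [hfold]
              exact hr.2 h (by simp)
        · have hok : pvOkB ('m'::b2::r2) = false := by
            rw [pvOkB]; simp [List.isPrefixOf, hb2, Ne.symm hb2]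
          refine ⟨by simp [hok], fun _ _ => ?_⟩
          have h3 : ('m'::b2::r2).foldl pvStepA ([], c) = (['m',b2] ++ r2, c) := by
            have : r2.foldl pvStepA (['m',b2], c) = (['m',b2] ++ r2, c) :=
              pvScan_noreset r2 _ c (pvNoPP_two _ _ (by simp) (by simp))
            simpa [pvStepA, pvBabList, hb2] using this
          simp [h3]
      · have hok : pvOkB (b1::r1) = false := by
          rw [pvOkB]; simp [List.isPrefixOf, hb1a, hb1y, hb1w, hb1m, Ne.symm hb1a, Ne.symm hb1y, Ne.symm hb1w, Ne.symm hb1m]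
        refine ⟨by simp [hok], fun _ _ => ?_⟩
        have h3 : (b1::r1).foldl pvStepA ([], c) = ([b1] ++ r1, c) := by
          have : r1.foldl pvStepA ([b1], c) = ([b1] ++ r1, c) :=
            pvScan_noreset r1 _ c (pvNoPP_one _ hb1a hb1y hb1w hb1m)
          simpa [pvStepA, pvBabList, hb1a, hb1y, hb1w, hb1m] using this
        simp [h3]

-- per word: A's acceptance condition (empty leftover word and a positive count) ↔ B's ok
theorem pvWord (l : List Char) :
    ((l.foldl pvStepA ([], (0 : Int))).1.length = 0 ∧ (l.foldl pvStepA ([], (0 : Int))).2 > 0)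
      ↔ pvOkB l = true := by
  have hm := pvMain l.length l le_rfl 0
  cases hok : pvOkB l with
  | true =>
      obtain ⟨c', h1, h2⟩ := hm.1 hok
      rw [h1]
      simpa using h2
  | false =>
      rcases l with _ | ⟨b, r⟩
      · simp
      · have := hm.2 hok (by simp)
        simp only [Bool.false_eq_true, iff_false]
        intro ⟨h1, _⟩
        exact this (List.length_eq_zero_iff.mp h1)

theorem pvFold_eq (l : List String) : ∀ acc : Int,
    l.foldl (fun answer bab =>
      let wc := bab.toList.foldl pvStepA ([], (0 : Int))
      if wc.1.length = 0 ∧ wc.2 > 0 then answer + 1 else answer) acc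
    = l.foldl (fun acc bab => acc + (if pvOkB bab.toList then 1 else 0)) acc := by
  induction l with
  | nil => intro acc; rfl
  | cons s rest ih =>
      intro acc
      simp only [List.foldl_cons]
      rw [ih]
      congr 1
      by_cases h : pvOkB s.toList = true
      · rw [if_pos (pvWord s.toList |>.mpr h), if_pos h]
      · rw [if_neg (fun hc => h ((pvWord s.toList).mp hc)), if_neg h]
        simp

-- ===== VERDICT (by name: the statement is the Claim_ definition above) =====
theorem solution_spec : Claim_equal_solution := by
  intro babbling _
  unfold Spec_solution solution solution_alt
  exact pvFold_eq babbling 0
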